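-- pv_equiv track=rewrite | github.com/Kaeham/SiigmaticReportAutomation | src/utils/NRatingFinder.py | n_rating_ust
-- ===== SOURCE A (Python) =====
-- def n_rating_ust(ultimate_value):
--     """
--     Get the n rating for the ultimate strength test
--     Inputs:
--         ultimate_value: the weakest pressure rating from UST
--     Outputs:
--         tuple containing the general and corner window rating respectively
--     """
--     general = [(5300, "N6, C4"), (4000, "N6, C3"), (3000, "N5, C2") , (2700, "N4, C2"),
--                (2000, "N4, C1"), (1800, "N3, C1"), (1400, "N3"), (900, "N2"), (600, "N1")]
--     corner = [(8000, "N6, C4"), (6000, "N6, C3"), (5900, "N5, C3"),  (4500, "N5, C2"),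
--               (4000, "N4, C2"), (3000, "N4, C1"), (2700, "N3, C1"), (2000, "N3"), (1300, "N2"), (900, "N1")]
--     genRating = None
--     cornRating = None
--     try:
--         ultimate_value = float(ultimate_value)
--     except:
--         return ("", "")
--
--     for idx in range(len(general)):
--         genNValue, genNRating = general[idx]
--         if ultimate_value >= genNValue and genRating == None:
--             genRating = genNRating + " (General)"
--
--     for idx in range(len(corner)):
--         cornNValue, cornNRating = corner[idx]
--         if ultimate_value >= cornNValue and cornRating == None:
--             cornRating = cornNRating + " (Corner)"
--
--     return (genRating, cornRating)
-- ===== SOURCE B (Python) =====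
-- def n_rating_ust(ultimate_value):
--     """
--     Get the n rating for the ultimate strength test (binary-search version).
--     """
--     try:
--         v = float(ultimate_value)
--     except Exception:
--         return ("", "")
--
--     gen_t = [600, 900, 1400, 1800, 2000, 2700, 3000, 4000, 5300]
--     gen_r = ["N1", "N2", "N3", "N3, C1", "N4, C1", "N4, C2", "N5, C2", "N6, C3", "N6, C4"]
--     corn_t = [900, 1300, 2000, 2700, 3000, 4000, 4500, 5900, 6000, 8000]
--     corn_r = ["N1", "N2", "N3", "N3, C1", "N4, C1", "N4, C2", "N5, C2", "N5, C3", "N6, C3", "N6, C4"]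
--
--     def pick(ts, rs, suffix):
--         # bisect_right over the ascending thresholds (NaN compares False, so lo stays 0)
--         lo, hi = 0, len(ts)
--         while lo < hi:
--             mid = (lo + hi) // 2
--             if v >= ts[mid]:
--                 lo = mid + 1
--             else:
--                 hi = mid
--         return None if lo == 0 else rs[lo - 1] + suffix
--
--     return (pick(gen_t, gen_r, " (General)"), pick(corn_t, corn_r, " (Corner)"))
-- ===== Notes on version B (the rewrite author's own statement) =====
-- stated objective: idiomatic
-- what changed: Replaces the two descending linear scans with first-match state by a hand-rolled bisect_right binary search over ascending threshold lists with parallel rating lists, mapping the insertion point to the highest threshold met.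
import Mathlib
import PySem

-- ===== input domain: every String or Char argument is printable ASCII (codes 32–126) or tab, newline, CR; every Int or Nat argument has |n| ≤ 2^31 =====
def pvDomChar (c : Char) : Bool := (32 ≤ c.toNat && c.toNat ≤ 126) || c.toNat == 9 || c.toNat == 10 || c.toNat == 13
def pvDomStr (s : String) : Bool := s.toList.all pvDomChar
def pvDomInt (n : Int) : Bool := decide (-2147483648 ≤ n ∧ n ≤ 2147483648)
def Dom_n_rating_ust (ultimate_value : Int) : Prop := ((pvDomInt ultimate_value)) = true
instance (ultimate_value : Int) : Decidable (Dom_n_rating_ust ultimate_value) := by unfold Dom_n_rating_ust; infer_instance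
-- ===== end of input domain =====

-- B replaces A's two descending linear scans by a bisect-right binary search over ascending
-- threshold/rating tables (idiomatic; same exact return value).


-- ===== PORT A =====
-- float(ultimate_value) on an int never raises and is exact on the domain, so the try/except
-- branch returning ("", "") is unreachable here and the conversion is the identity.
def n_rating_ust (ultimate_value : Int) : Option String × Option String :=
  let general : List (Int × String) := [(5300, "N6, C4"), (4000, "N6, C3"), (3000, "N5, C2"), (2700, "N4, C2"),
    (2000, "N4, C1"), (1800, "N3, C1"), (1400, "N3"), (900, "N2"), (600, "N1")]
  let corner : List (Int × String) := [(8000, "N6, C4"), (6000, "N6, C3"), (5900, "N5, C3"), (4500, "N5, C2"),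
    (4000, "N4, C2"), (3000, "N4, C1"), (2700, "N3, C1"), (2000, "N3"), (1300, "N2"), (900, "N1")]
  let genRating := general.foldl
    (fun r p => if ultimate_value ≥ p.1 ∧ r = none then some (p.2 ++ " (General)") else r) none
  let cornRating := corner.foldl
    (fun r p => if ultimate_value ≥ p.1 ∧ r = none then some (p.2 ++ " (Corner)") else r) none
  (genRating, cornRating)

-- ===== PORT B =====
-- bisect_right over the ascending thresholds; the while loop is ported with fuel = ts.length,
-- which bounds the loop's iteration count (each step strictly shrinks hi - lo).
def pvBisect (v : Int) (ts : List Int) : Nat → Nat → Nat → Nat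
  | 0, lo, _ => lo
  | fuel+1, lo, hi =>
    if lo < hi then
      let mid := (lo + hi) / 2
      if v ≥ ts.getD mid 0 then pvBisect v ts fuel (mid+1) hi else pvBisect v ts fuel lo mid
    else lo

def pvPick (v : Int) (ts : List Int) (rs : List String) (suffix : String) : Option String :=
  let lo := pvBisect v ts ts.length 0 ts.length
  if lo = 0 then none else some (rs.getD (lo - 1) "" ++ suffix)

-- float(ultimate_value) on an int never raises and is exact on the domain (identity here).
def n_rating_ust_alt (ultimate_value : Int) : Option String × Option String :=
  let genT : List Int := [600, 900, 1400, 1800, 2000, 2700, 3000, 4000, 5300]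
  let genR : List String := ["N1", "N2", "N3", "N3, C1", "N4, C1", "N4, C2", "N5, C2", "N6, C3", "N6, C4"]
  let cornT : List Int := [900, 1300, 2000, 2700, 3000, 4000, 4500, 5900, 6000, 8000]
  let cornR : List String := ["N1", "N2", "N3", "N3, C1", "N4, C1", "N4, C2", "N5, C2", "N5, C3", "N6, C3", "N6, C4"]
  (pvPick ultimate_value genT genR " (General)", pvPick ultimate_value cornT cornR " (Corner)")

-- ===== PRECONDITION & SPEC =====
def Spec_n_rating_ust (ultimate_value : Int) (out : Option String × Option String) : Prop := out = n_rating_ust_alt ultimate_value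
instance (ultimate_value : Int) (out : Option String × Option String) : Decidable (Spec_n_rating_ust ultimate_value out) := by unfold Spec_n_rating_ust; infer_instance

-- ===== CLAIM (what is proved, stated in full; the proofs are below) =====
def Claim_equal_n_rating_ust : Prop := ∀ (ultimate_value : Int), Dom_n_rating_ust ultimate_value → Spec_n_rating_ust ultimate_value (n_rating_ust ultimate_value)

-- ===== LEMMAS AND PROOFS =====

-- ===== VERDICT (by name: the statement is the Claim_ definition above) =====
theorem n_rating_ust_spec : Claim_equal_n_rating_ust := by
  intro ultimate_value _
  unfold Spec_n_rating_ust
  rcases lt_or_ge ultimate_value 600 with h1 | h1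
  · simp [n_rating_ust, n_rating_ust_alt, pvPick, pvBisect, List.foldl, ge_iff_le, show ¬ (600:Int) ≤ ultimate_value by omega, show ¬ (900:Int) ≤ ultimate_value by omega, show ¬ (1300:Int) ≤ ultimate_value by omega, show ¬ (1400:Int) ≤ ultimate_value by omega, show ¬ (1800:Int) ≤ ultimate_value by omega, show ¬ (2000:Int) ≤ ultimate_value by omega, show ¬ (2700:Int) ≤ ultimate_value by omega, show ¬ (3000:Int) ≤ ultimate_value by omega, show ¬ (4000:Int) ≤ ultimate_value by omega, show ¬ (4500:Int) ≤ ultimate_value by omega, show ¬ (5300:Int) ≤ ultimate_value by omega, show ¬ (5900:Int) ≤ ultimate_value by omega, show ¬ (6000:Int) ≤ ultimate_value by omega, show ¬ (8000:Int) ≤ ultimate_value by omega]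
  rcases lt_or_ge ultimate_value 900 with h2 | h2
  · simp [n_rating_ust, n_rating_ust_alt, pvPick, pvBisect, List.foldl, ge_iff_le, show (600:Int) ≤ ultimate_value by omega, show ¬ (900:Int) ≤ ultimate_value by omega, show ¬ (1300:Int) ≤ ultimate_value by omega, show ¬ (1400:Int) ≤ ultimate_value by omega, show ¬ (1800:Int) ≤ ultimate_value by omega, show ¬ (2000:Int) ≤ ultimate_value by omega, show ¬ (2700:Int) ≤ ultimate_value by omega, show ¬ (3000:Int) ≤ ultimate_value by omega, show ¬ (4000:Int) ≤ ultimate_value by omega, show ¬ (4500:Int) ≤ ultimate_value by omega, show ¬ (5300:Int) ≤ ultimate_value by omega, show ¬ (5900:Int) ≤ ultimate_value by omega, show ¬ (6000:Int) ≤ ultimate_value by omega, show ¬ (8000:Int) ≤ ultimate_value by omega]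
  rcases lt_or_ge ultimate_value 1300 with h3 | h3
  · simp [n_rating_ust, n_rating_ust_alt, pvPick, pvBisect, List.foldl, ge_iff_le, show (600:Int) ≤ ultimate_value by omega, show (900:Int) ≤ ultimate_value by omega, show ¬ (1300:Int) ≤ ultimate_value by omega, show ¬ (1400:Int) ≤ ultimate_value by omega, show ¬ (1800:Int) ≤ ultimate_value by omega, show ¬ (2000:Int) ≤ ultimate_value by omega, show ¬ (2700:Int) ≤ ultimate_value by omega, show ¬ (3000:Int) ≤ ultimate_value by omega, show ¬ (4000:Int) ≤ ultimate_value by omega, show ¬ (4500:Int) ≤ ultimate_value by omega, show ¬ (5300:Int) ≤ ultimate_value by omega, show ¬ (5900:Int) ≤ ultimate_value by omega, show ¬ (6000:Int) ≤ ultimate_value by omega, show ¬ (8000:Int) ≤ ultimate_value by omega]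
  rcases lt_or_ge ultimate_value 1400 with h4 | h4
  · simp [n_rating_ust, n_rating_ust_alt, pvPick, pvBisect, List.foldl, ge_iff_le, show (600:Int) ≤ ultimate_value by omega, show (900:Int) ≤ ultimate_value by omega, show (1300:Int) ≤ ultimate_value by omega, show ¬ (1400:Int) ≤ ultimate_value by omega, show ¬ (1800:Int) ≤ ultimate_value by omega, show ¬ (2000:Int) ≤ ultimate_value by omega, show ¬ (2700:Int) ≤ ultimate_value by omega, show ¬ (3000:Int) ≤ ultimate_value by omega, show ¬ (4000:Int) ≤ ultimate_value by omega, show ¬ (4500:Int) ≤ ultimate_value by omega, show ¬ (5300:Int) ≤ ultimate_value by omega, show ¬ (5900:Int) ≤ ultimate_value by omega, show ¬ (6000:Int) ≤ ultimate_value by omega, show ¬ (8000:Int) ≤ ultimate_value by omega]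
  rcases lt_or_ge ultimate_value 1800 with h5 | h5
  · simp [n_rating_ust, n_rating_ust_alt, pvPick, pvBisect, List.foldl, ge_iff_le, show (600:Int) ≤ ultimate_value by omega, show (900:Int) ≤ ultimate_value by omega, show (1300:Int) ≤ ultimate_value by omega, show (1400:Int) ≤ ultimate_value by omega, show ¬ (1800:Int) ≤ ultimate_value by omega, show ¬ (2000:Int) ≤ ultimate_value by omega, show ¬ (2700:Int) ≤ ultimate_value by omega, show ¬ (3000:Int) ≤ ultimate_value by omega, show ¬ (4000:Int) ≤ ultimate_value by omega, show ¬ (4500:Int) ≤ ultimate_value by omega, show ¬ (5300:Int) ≤ ultimate_value by omega, show ¬ (5900:Int) ≤ ultimate_value by omega, show ¬ (6000:Int) ≤ ultimate_value by omega, show ¬ (8000:Int) ≤ ultimate_value by omega]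
  rcases lt_or_ge ultimate_value 2000 with h6 | h6
  · simp [n_rating_ust, n_rating_ust_alt, pvPick, pvBisect, List.foldl, ge_iff_le, show (600:Int) ≤ ultimate_value by omega, show (900:Int) ≤ ultimate_value by omega, show (1300:Int) ≤ ultimate_value by omega, show (1400:Int) ≤ ultimate_value by omega, show (1800:Int) ≤ ultimate_value by omega, show ¬ (2000:Int) ≤ ultimate_value by omega, show ¬ (2700:Int) ≤ ultimate_value by omega, show ¬ (3000:Int) ≤ ultimate_value by omega, show ¬ (4000:Int) ≤ ultimate_value by omega, show ¬ (4500:Int) ≤ ultimate_value by omega, show ¬ (5300:Int) ≤ ultimate_value by omega, show ¬ (5900:Int) ≤ ultimate_value by omega, show ¬ (6000:Int) ≤ ultimate_value by omega, show ¬ (8000:Int) ≤ ultimate_value by omega]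
  rcases lt_or_ge ultimate_value 2700 with h7 | h7
  · simp [n_rating_ust, n_rating_ust_alt, pvPick, pvBisect, List.foldl, ge_iff_le, show (600:Int) ≤ ultimate_value by omega, show (900:Int) ≤ ultimate_value by omega, show (1300:Int) ≤ ultimate_value by omega, show (1400:Int) ≤ ultimate_value by omega, show (1800:Int) ≤ ultimate_value by omega, show (2000:Int) ≤ ultimate_value by omega, show ¬ (2700:Int) ≤ ultimate_value by omega, show ¬ (3000:Int) ≤ ultimate_value by omega, show ¬ (4000:Int) ≤ ultimate_value by omega, show ¬ (4500:Int) ≤ ultimate_value by omega, show ¬ (5300:Int) ≤ ultimate_value by omega, show ¬ (5900:Int) ≤ ultimate_value by omega, show ¬ (6000:Int) ≤ ultimate_value by omega, show ¬ (8000:Int) ≤ ultimate_value by omega]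
  rcases lt_or_ge ultimate_value 3000 with h8 | h8
  · simp [n_rating_ust, n_rating_ust_alt, pvPick, pvBisect, List.foldl, ge_iff_le, show (600:Int) ≤ ultimate_value by omega, show (900:Int) ≤ ultimate_value by omega, show (1300:Int) ≤ ultimate_value by omega, show (1400:Int) ≤ ultimate_value by omega, show (1800:Int) ≤ ultimate_value by omega, show (2000:Int) ≤ ultimate_value by omega, show (2700:Int) ≤ ultimate_value by omega, show ¬ (3000:Int) ≤ ultimate_value by omega, show ¬ (4000:Int) ≤ ultimate_value by omega, show ¬ (4500:Int) ≤ ultimate_value by omega, show ¬ (5300:Int) ≤ ultimate_value by omega, show ¬ (5900:Int) ≤ ultimate_value by omega, show ¬ (6000:Int) ≤ ultimate_value by omega, show ¬ (8000:Int) ≤ ultimate_value by omega]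
  rcases lt_or_ge ultimate_value 4000 with h9 | h9
  · simp [n_rating_ust, n_rating_ust_alt, pvPick, pvBisect, List.foldl, ge_iff_le, show (600:Int) ≤ ultimate_value by omega, show (900:Int) ≤ ultimate_value by omega, show (1300:Int) ≤ ultimate_value by omega, show (1400:Int) ≤ ultimate_value by omega, show (1800:Int) ≤ ultimate_value by omega, show (2000:Int) ≤ ultimate_value by omega, show (2700:Int) ≤ ultimate_value by omega, show (3000:Int) ≤ ultimate_value by omega, show ¬ (4000:Int) ≤ ultimate_value by omega, show ¬ (4500:Int) ≤ ultimate_value by omega, show ¬ (5300:Int) ≤ ultimate_value by omega, show ¬ (5900:Int) ≤ ultimate_value by omega, show ¬ (6000:Int) ≤ ultimate_value by omega, show ¬ (8000:Int) ≤ ultimate_value by omega]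
  rcases lt_or_ge ultimate_value 4500 with h10 | h10
  · simp [n_rating_ust, n_rating_ust_alt, pvPick, pvBisect, List.foldl, ge_iff_le, show (600:Int) ≤ ultimate_value by omega, show (900:Int) ≤ ultimate_value by omega, show (1300:Int) ≤ ultimate_value by omega, show (1400:Int) ≤ ultimate_value by omega, show (1800:Int) ≤ ultimate_value by omega, show (2000:Int) ≤ ultimate_value by omega, show (2700:Int) ≤ ultimate_value by omega, show (3000:Int) ≤ ultimate_value by omega, show (4000:Int) ≤ ultimate_value by omega, show ¬ (4500:Int) ≤ ultimate_value by omega, show ¬ (5300:Int) ≤ ultimate_value by omega, show ¬ (5900:Int) ≤ ultimate_value by omega, show ¬ (6000:Int) ≤ ultimate_value by omega, show ¬ (8000:Int) ≤ ultimate_value by omega]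
  rcases lt_or_ge ultimate_value 5300 with h11 | h11
  · simp [n_rating_ust, n_rating_ust_alt, pvPick, pvBisect, List.foldl, ge_iff_le, show (600:Int) ≤ ultimate_value by omega, show (900:Int) ≤ ultimate_value by omega, show (1300:Int) ≤ ultimate_value by omega, show (1400:Int) ≤ ultimate_value by omega, show (1800:Int) ≤ ultimate_value by omega, show (2000:Int) ≤ ultimate_value by omega, show (2700:Int) ≤ ultimate_value by omega, show (3000:Int) ≤ ultimate_value by omega, show (4000:Int) ≤ ultimate_value by omega, show (4500:Int) ≤ ultimate_value by omega, show ¬ (5300:Int) ≤ ultimate_value by omega, show ¬ (5900:Int) ≤ ultimate_value by omega, show ¬ (6000:Int) ≤ ultimate_value by omega, show ¬ (8000:Int) ≤ ultimate_value by omega]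
  rcases lt_or_ge ultimate_value 5900 with h12 | h12
  · simp [n_rating_ust, n_rating_ust_alt, pvPick, pvBisect, List.foldl, ge_iff_le, show (600:Int) ≤ ultimate_value by omega, show (900:Int) ≤ ultimate_value by omega, show (1300:Int) ≤ ultimate_value by omega, show (1400:Int) ≤ ultimate_value by omega, show (1800:Int) ≤ ultimate_value by omega, show (2000:Int) ≤ ultimate_value by omega, show (2700:Int) ≤ ultimate_value by omega, show (3000:Int) ≤ ultimate_value by omega, show (4000:Int) ≤ ultimate_value by omega, show (4500:Int) ≤ ultimate_value by omega, show (5300:Int) ≤ ultimate_value by omega, show ¬ (5900:Int) ≤ ultimate_value by omega, show ¬ (6000:Int) ≤ ultimate_value by omega, show ¬ (8000:Int) ≤ ultimate_value by omega]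
  rcases lt_or_ge ultimate_value 6000 with h13 | h13
  · simp [n_rating_ust, n_rating_ust_alt, pvPick, pvBisect, List.foldl, ge_iff_le, show (600:Int) ≤ ultimate_value by omega, show (900:Int) ≤ ultimate_value by omega, show (1300:Int) ≤ ultimate_value by omega, show (1400:Int) ≤ ultimate_value by omega, show (1800:Int) ≤ ultimate_value by omega, show (2000:Int) ≤ ultimate_value by omega, show (2700:Int) ≤ ultimate_value by omega, show (3000:Int) ≤ ultimate_value by omega, show (4000:Int) ≤ ultimate_value by omega, show (4500:Int) ≤ ultimate_value by omega, show (5300:Int) ≤ ultimate_value by omega, show (5900:Int) ≤ ultimate_value by omega, show ¬ (6000:Int) ≤ ultimate_value by omega, show ¬ (8000:Int) ≤ ultimate_value by omega]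
  rcases lt_or_ge ultimate_value 8000 with h14 | h14
  · simp [n_rating_ust, n_rating_ust_alt, pvPick, pvBisect, List.foldl, ge_iff_le, show (600:Int) ≤ ultimate_value by omega, show (900:Int) ≤ ultimate_value by omega, show (1300:Int) ≤ ultimate_value by omega, show (1400:Int) ≤ ultimate_value by omega, show (1800:Int) ≤ ultimate_value by omega, show (2000:Int) ≤ ultimate_value by omega, show (2700:Int) ≤ ultimate_value by omega, show (3000:Int) ≤ ultimate_value by omega, show (4000:Int) ≤ ultimate_value by omega, show (4500:Int) ≤ ultimate_value by omega, show (5300:Int) ≤ ultimate_value by omega, show (5900:Int) ≤ ultimate_value by omega, show (6000:Int) ≤ ultimate_value by omega, show ¬ (8000:Int) ≤ ultimate_value by omega]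
  simp [n_rating_ust, n_rating_ust_alt, pvPick, pvBisect, List.foldl, ge_iff_le, show (600:Int) ≤ ultimate_value by omega, show (900:Int) ≤ ultimate_value by omega, show (1300:Int) ≤ ultimate_value by omega, show (1400:Int) ≤ ultimate_value by omega, show (1800:Int) ≤ ultimate_value by omega, show (2000:Int) ≤ ultimate_value by omega, show (2700:Int) ≤ ultimate_value by omega, show (3000:Int) ≤ ultimate_value by omega, show (4000:Int) ≤ ultimate_value by omega, show (4500:Int) ≤ ultimate_value by omega, show (5300:Int) ≤ ultimate_value by omega, show (5900:Int) ≤ ultimate_value by omega, show (6000:Int) ≤ ultimate_value by omega, show (8000:Int) ≤ ultimate_value by omega]
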